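-- pv_equiv track=rewrite | github.com/jean0206/alpha-beta-exercise | alphaybetha.py | get_odd_row
-- ===== SOURCE A (Python) =====
-- LINE_SIZE = 3
--
-- def get_odd_row(node, row, cols):
--     [start, end] = [
--         int(int((row/2)) * (2 * cols - 1) + cols - 1),
--         int(int((row/2)) * (2 * cols - 1) + cols - 1 + cols)
--     ]
--     row_nodes = node[start:end]
--
--     row = ""
--
--     for col in range(2 * cols - 1):
--         if col % 2 != 0:
--             row = row + " " * LINE_SIZE
--         else:
--             head_symbol = row_nodes.pop(0)
--             symbol = " " if head_symbol is None else head_symbol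
--
--             row = row + symbol
--
--     return row
-- ===== SOURCE B (Python) =====
-- LINE_SIZE = 3
--
-- def get_odd_row(node, row, cols):
--     start = int(int(row / 2) * (2 * cols - 1) + cols - 1)
--     row_nodes = node[start:start + cols]
--     symbols = [" " if row_nodes[i] is None else row_nodes[i] for i in range(cols)]
--     return (" " * LINE_SIZE).join(symbols)
-- ===== Notes on version B (the rewrite author's own statement) =====
-- stated objective: simpler
-- what changed: Replaces the 2*cols-1-step loop with its parity branch and destructive pop(0) mutation by a direct map over the cols node positions joined with the 3-space separator.
import Mathlib
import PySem

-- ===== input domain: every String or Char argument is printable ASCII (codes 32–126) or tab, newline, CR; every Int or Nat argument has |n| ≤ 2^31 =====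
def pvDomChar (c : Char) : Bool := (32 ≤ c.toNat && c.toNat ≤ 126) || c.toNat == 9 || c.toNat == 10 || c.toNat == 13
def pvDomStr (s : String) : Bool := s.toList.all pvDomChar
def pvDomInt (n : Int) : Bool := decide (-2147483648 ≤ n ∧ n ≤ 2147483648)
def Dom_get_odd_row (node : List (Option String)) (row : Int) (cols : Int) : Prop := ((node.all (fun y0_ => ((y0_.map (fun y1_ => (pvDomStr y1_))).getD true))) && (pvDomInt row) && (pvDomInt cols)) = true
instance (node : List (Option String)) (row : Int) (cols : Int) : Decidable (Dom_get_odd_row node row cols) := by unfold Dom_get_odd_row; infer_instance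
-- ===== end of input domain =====

-- B replaces A's 2*cols-1-step parity loop with pop(0) mutation by a map over the cols
-- positions joined with the 3-space separator (objective: simpler). Return value only; no mutation is observable.

-- ===== PORT A =====
-- strings are built on the List Char side (PySem convention); loop state = (remaining row_nodes, chars so far);
-- the Option threads the IndexError of pop(0) on an exhausted list (none = raise; excluded by Pre_).
def get_odd_row (node : List (Option String)) (row : Int) (cols : Int) : String :=
  let start : Int := PySem.Int.truncdiv row 2 * (2 * cols - 1) + cols - 1
  let end_ : Int := PySem.Int.truncdiv row 2 * (2 * cols - 1) + cols - 1 + cols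
  let row_nodes := PySem.List.slice node (some start) (some end_)
  let res :=
    (PySem.List.pyRange 0 (2 * cols - 1) 1).foldl
      (fun st col =>
        match st with
        | none => none
        | some (rn, s) =>
          if PySem.Int.mod col 2 ≠ 0 then
            some (rn, s ++ "   ".toList)
          else
            match PySem.List.pop? rn 0 with
            | none => none
            | some (head_symbol, rn') =>
              let symbol : List Char := match head_symbol with
                | none => " ".toList
                | some x => x.toList
              some (rn', s ++ symbol))
      (some (row_nodes, ([] : List Char)))
  match res with
  | some (_, s) => String.ofList s
  | none => ""

-- ===== PORT B =====
def get_odd_row_alt (node : List (Option String)) (row : Int) (cols : Int) : String :=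
  let start : Int := PySem.Int.truncdiv row 2 * (2 * cols - 1) + cols - 1
  let row_nodes := PySem.List.slice node (some start) (some (start + cols))
  let symbols : List String :=
    (PySem.List.pyRange 0 cols 1).map
      (fun i =>
        match PySem.List.pyGet? row_nodes i with
        | some none => " "
        | some (some x) => x
        | none => " ")
  PySem.Str.join "   " symbols

-- ===== PRECONDITION & SPEC =====
-- Pre_ excludes exactly the inputs on which both programs raise IndexError: the slice holds
-- fewer than cols elements, so A's cols-th pop(0) (and B's indexing) runs off the end.
def Pre_get_odd_row (node : List (Option String)) (row : Int) (cols : Int) : Prop :=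
  cols ≤ ((PySem.List.slice node
    (some (PySem.Int.truncdiv row 2 * (2 * cols - 1) + cols - 1))
    (some (PySem.Int.truncdiv row 2 * (2 * cols - 1) + cols - 1 + cols))).length : Int)
instance (node : List (Option String)) (row : Int) (cols : Int) : Decidable (Pre_get_odd_row node row cols) := by unfold Pre_get_odd_row; infer_instance

def pvWitness_get_odd_row : List (Option String) × Int × Int := ([some "5", none, some "ab"], 0, 1)

def Spec_get_odd_row (node : List (Option String)) (row : Int) (cols : Int) (out : String) : Prop := out = get_odd_row_alt node row cols
instance (node : List (Option String)) (row : Int) (cols : Int) (out : String) : Decidable (Spec_get_odd_row node row cols out) := by unfold Spec_get_odd_row; infer_instance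

-- ===== CLAIM (what is proved, stated in full; the proofs are below) =====
def Claim_equal_get_odd_row : Prop := ∀ (node : List (Option String)) (row : Int) (cols : Int), Dom_get_odd_row node row cols → Pre_get_odd_row node row cols → Spec_get_odd_row node row cols (get_odd_row node row cols)

-- ===== LEMMAS AND PROOFS =====

def pvSym (x : Option String) : String := match x with | none => " " | some s => s

theorem pv_join_append (sep : List Char) (xs : List (List Char)) (y : List Char) (h : xs ≠ []) :
    PySem.Chars.join sep (xs ++ [y]) = PySem.Chars.join sep xs ++ sep ++ y := by
  induction xs with
  | nil => exact absurd rfl h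
  | cons a rest ih =>
    cases rest with
    | nil => simp [PySem.Chars.join_cons_cons, PySem.Chars.join_singleton]
    | cons b r =>
      have h2 := ih (by simp)
      simp only [List.cons_append] at h2 ⊢
      rw [PySem.Chars.join_cons_cons, PySem.Chars.join_cons_cons, h2]
      simp [List.append_assoc]

theorem pv_loop (n : Nat) (hn : 1 ≤ n) :
    ∀ (L : List (Option String)) (s : List Char), n ≤ L.length →
    (PySem.List.pyRange 0 (2*(n:Int)-1) 1).foldl
      (fun st col =>
        match st with
        | none => none
        | some (rn, s) =>
          if PySem.Int.mod col 2 ≠ 0 then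
            some (rn, s ++ "   ".toList)
          else
            match PySem.List.pop? rn 0 with
            | none => none
            | some (head_symbol, rn') =>
              let symbol : List Char := match head_symbol with
                | none => " ".toList
                | some x => x.toList
              some (rn', s ++ symbol))
      (some (L, s))
    = some (L.drop n, s ++ PySem.Chars.join "   ".toList ((L.take n).map (fun x => (pvSym x).toList))) := by
  induction n, hn using Nat.le_induction with
  | base =>
    intro L s hL
    match L, hL with
    | x :: L', _ =>
      have h1 : (2*((1:Nat):Int)-1) = 0 + 1 := by norm_num
      rw [h1, PySem.List.pyRange_one_singleton]
      simp only [List.foldl_cons, List.foldl_nil]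
      have hm : ¬ (PySem.Int.mod 0 2 ≠ 0) := by decide
      rw [if_neg hm, PySem.List.pop?_zero_cons]
      cases x <;> simp [pvSym, PySem.Chars.join_singleton]
  | succ n hn ih =>
    intro L s hL
    have hnL : n < L.length := by omega
    have h1 : (2*((n+1:Nat):Int)-1) = (2*(n:Int)-1) + 1 + 1 := by push_cast; ring
    rw [h1, PySem.List.pyRange_one_succ_right (by omega),
        PySem.List.pyRange_one_succ_right (by omega),
        List.foldl_append, List.foldl_append, ih L s (by omega)]
    simp only [List.foldl_cons, List.foldl_nil]
    have hodd : PySem.Int.mod (2*(n:Int)-1) 2 ≠ 0 := by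
      simp only [ne_eq, PySem.Int.mod_eq_zero_iff_dvd]; omega
    have heven : ¬ (PySem.Int.mod (2*(n:Int)-1+1) 2 ≠ 0) := by
      simp only [ne_eq, not_not]
      simp only [PySem.Int.mod_eq_zero_iff_dvd]; omega
    simp only [if_pos hodd, if_neg heven]
    rw [List.drop_eq_getElem_cons hnL, PySem.List.pop?_zero_cons]
    have htake : L.take (n+1) = L.take n ++ [L[n]] := by
      rw [List.take_add_one]; simp [List.getElem?_eq_getElem hnL]
    rw [htake]
    have hne : (L.take n).map (fun x => (pvSym x).toList) ≠ [] := by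
      intro h
      rcases List.take_eq_nil_iff.mp (List.map_eq_nil_iff.mp h) with h' | h'
      · omega
      · rw [h'] at hnL; simp at hnL
    rw [List.map_append, List.map_singleton, pv_join_append _ _ _ hne]
    cases L[n] <;> simp [pvSym, List.append_assoc]

theorem pv_main (node : List (Option String)) (row : Int) (cols : Int)
    (hpre : cols ≤ ((PySem.List.slice node
      (some (PySem.Int.truncdiv row 2 * (2 * cols - 1) + cols - 1))
      (some (PySem.Int.truncdiv row 2 * (2 * cols - 1) + cols - 1 + cols))).length : Int)) :
    get_odd_row node row cols = get_odd_row_alt node row cols := by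
  simp only [get_odd_row, get_odd_row_alt]
  have hend : PySem.Int.truncdiv row 2 * (2 * cols - 1) + cols - 1 + cols
      = (PySem.Int.truncdiv row 2 * (2 * cols - 1) + cols - 1) + cols := by ring
  rw [hend] at hpre ⊢
  set L := PySem.List.slice node
      (some (PySem.Int.truncdiv row 2 * (2 * cols - 1) + cols - 1))
      (some ((PySem.Int.truncdiv row 2 * (2 * cols - 1) + cols - 1) + cols)) with hLdef
  by_cases hc : cols ≤ 0
  · rw [PySem.List.pyRange_one_eq_nil (by omega), PySem.List.pyRange_one_eq_nil (by omega)]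
    simp [PySem.Str.join]
  · replace hc : 0 < cols := by omega
    set n : Nat := cols.toNat with hn
    have hcast : (n : Int) = cols := Int.toNat_of_nonneg (by omega)
    have hn1 : 1 ≤ n := by omega
    have hnL : n ≤ L.length := by omega
    have hrw : 2 * cols - 1 = 2 * (n : Int) - 1 := by rw [hcast]
    rw [hrw, pv_loop n hn1 L [] hnL]
    -- now B side
    have hsym : (PySem.List.pyRange 0 cols 1).map
        (fun i =>
          match PySem.List.pyGet? L i with
          | some none => " "
          | some (some x) => x
          | none => " ")
        = (L.take n).map pvSym := by
      apply List.ext_getElem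
      · simp [PySem.List.length_pyRange_one]; omega
      · intro k hk _
        have hk2 : (k : Int) < cols := by
          simpa [PySem.List.length_pyRange_one] using hk
        have hk' : k < n := by omega
        have hkL : k < L.length := by omega
        simp only [List.getElem_map, PySem.List.getElem_pyRange_one, List.getElem_take]
        have : PySem.List.pyGet? L ((0 : Int) + (k : Int)) = some L[k] := by
          simp [PySem.List.pyGet?, PySem.List.pyIdx?, hkL]
        rw [this]
        cases L[k] <;> simp [pvSym]
    rw [hsym]
    have hB : PySem.Str.join "   " ((L.take n).map pvSym)
        = String.ofList (PySem.Chars.join "   ".toList (((L.take n).map pvSym).map String.toList)) := by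
      rw [← PySem.Str.toList_join, String.ofList_toList]
    rw [hB, List.map_map]
    rfl

-- ===== VERDICT (by name: the statement is the Claim_ definition above) =====
theorem get_odd_row_spec : Claim_equal_get_odd_row := by
  intro node row cols _hdom hpre
  unfold Spec_get_odd_row
  exact pv_main node row cols hpre
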